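-- pv_equiv track=rewrite | github.com/RifaDeen/symAD-ECNN | demo_app/backend/preprocessing_service.py | get_slice_indices_around
-- ===== SOURCE A (Python) =====
-- def get_slice_indices_around(center_idx: int, depth: int, k: int) -> list[int]:
--     k = int(k)
--     if k <= 1:
--         return [int(center_idx)]
--     if k % 2 == 0:
--         k += 1
--
--     half = k // 2
--     idxs = [center_idx + i for i in range(-half, half + 1)]
--     idxs = [max(0, min(depth - 1, i)) for i in idxs]
--
--     idxs_unique = []
--     for i in idxs:
--         if i not in idxs_unique:
--             idxs_unique.append(i)
--     return idxs_unique
-- ===== SOURCE B (Python) =====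
-- def get_slice_indices_around(center_idx: int, depth: int, k: int) -> list[int]:
--     k = int(k)
--     if k <= 1:
--         return [int(center_idx)]
--     if k % 2 == 0:
--         k += 1
--     half = k // 2
--     lo = max(0, min(depth - 1, center_idx - half))
--     hi = max(0, min(depth - 1, center_idx + half))
--     return list(range(lo, hi + 1))
-- ===== Notes on version B (the rewrite author's own statement) =====
-- stated objective: simpler
-- what changed: Replaced the window-build / clamp-each-element / O(n^2) dedup-scan pipeline with a closed-form contiguous range: clamp only the two endpoints and return range(lo, hi+1), since clamping is monotone with unit steps.
import Mathlib
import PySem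

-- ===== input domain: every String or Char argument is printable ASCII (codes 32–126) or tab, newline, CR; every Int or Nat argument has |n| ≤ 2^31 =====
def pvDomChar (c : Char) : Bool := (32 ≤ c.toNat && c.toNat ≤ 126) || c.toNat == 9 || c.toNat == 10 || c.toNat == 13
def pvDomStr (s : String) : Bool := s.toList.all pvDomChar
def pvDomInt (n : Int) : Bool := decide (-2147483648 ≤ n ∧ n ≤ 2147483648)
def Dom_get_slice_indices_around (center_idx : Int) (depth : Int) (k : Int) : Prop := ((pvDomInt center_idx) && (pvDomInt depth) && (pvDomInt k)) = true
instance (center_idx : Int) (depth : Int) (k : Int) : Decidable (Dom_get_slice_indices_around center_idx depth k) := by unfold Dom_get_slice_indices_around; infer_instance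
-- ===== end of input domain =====

-- B clamps only the two window endpoints and returns the contiguous range, instead of
-- building the window, clamping every element and deduplicating with a quadratic scan (simpler).

-- ===== PORT A =====
def get_slice_indices_around (center_idx : Int) (depth : Int) (k : Int) : List Int :=
  if k ≤ 1 then [center_idx]
  else
    let k' := if PySem.Int.mod k 2 == 0 then k + 1 else k
    let half := PySem.Int.floordiv k' 2
    let idxs := (PySem.List.pyRange (-half) (half + 1) 1).map (fun i => center_idx + i)
    let idxs2 := idxs.map (fun i => max 0 (min (depth - 1) i))
    idxs2.foldl (fun acc i => if i ∈ acc then acc else acc ++ [i]) []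

-- ===== PORT B =====
def get_slice_indices_around_alt (center_idx : Int) (depth : Int) (k : Int) : List Int :=
  if k ≤ 1 then [center_idx]
  else
    let k' := if PySem.Int.mod k 2 == 0 then k + 1 else k
    let half := PySem.Int.floordiv k' 2
    let lo := max 0 (min (depth - 1) (center_idx - half))
    let hi := max 0 (min (depth - 1) (center_idx + half))
    PySem.List.pyRange lo (hi + 1) 1

-- ===== PRECONDITION & SPEC =====
def Spec_get_slice_indices_around (center_idx : Int) (depth : Int) (k : Int) (out : List Int) : Prop := out = get_slice_indices_around_alt center_idx depth k
instance (center_idx : Int) (depth : Int) (k : Int) (out : List Int) : Decidable (Spec_get_slice_indices_around center_idx depth k out) := by unfold Spec_get_slice_indices_around; infer_instance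

-- ===== CLAIM (what is proved, stated in full; the proofs are below) =====
def Claim_equal_get_slice_indices_around : Prop := ∀ (center_idx : Int) (depth : Int) (k : Int), Dom_get_slice_indices_around center_idx depth k → Spec_get_slice_indices_around center_idx depth k (get_slice_indices_around center_idx depth k)

-- ===== LEMMAS AND PROOFS =====

-- the clamp function A applies to every window element
def pvClamp (d i : Int) : Int := max 0 (min (d - 1) i)

lemma pvClamp_mono {d i j : Int} (h : i ≤ j) : pvClamp d i ≤ pvClamp d j := by
  unfold pvClamp; omega

lemma pvClamp_step (d i : Int) : pvClamp d (i + 1) ≤ pvClamp d i + 1 := by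
  unfold pvClamp; omega

-- shifting a range: map (c + ·) over range a..b is range (c+a)..(c+b)
lemma pvRange_map_add (c a b : Int) :
    (PySem.List.pyRange a b 1).map (fun i => c + i) = PySem.List.pyRange (c + a) (c + b) 1 := by
  rw [PySem.List.pyRange_one, PySem.List.pyRange_one, List.map_map]
  have : c + b - (c + a) = b - a := by ring
  rw [this]
  apply List.map_congr_left
  intro x _; simp; ring

-- core: dedup-scan of the clamped range lo..lo+n is the range clamp lo .. clamp (lo+n)
lemma pvDedup_clamped_range (d lo : Int) (n : Nat) :
    ((PySem.List.pyRange lo (lo + n + 1) 1).map (pvClamp d)).foldl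
      (fun acc i => if i ∈ acc then acc else acc ++ [i]) []
    = PySem.List.pyRange (pvClamp d lo) (pvClamp d (lo + n) + 1) 1 := by
  induction n with
  | zero =>
      rw [show lo + (0:Nat) + 1 = lo + 1 by push_cast; ring, PySem.List.pyRange_one_singleton]
      simp [PySem.List.pyRange_one_singleton]
  | succ m ih =>
      rw [show ((m + 1 : Nat) : Int) = (m : Int) + 1 by push_cast; ring,
          show lo + ((m : Int) + 1) = lo + m + 1 by ring,
          PySem.List.pyRange_one_succ_right (show lo ≤ lo + (m : Int) + 1 by omega),
          List.map_append, List.foldl_append, ih]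
      simp only [List.map_cons, List.map_nil, List.foldl_cons, List.foldl_nil]
      have hmono : pvClamp d (lo + m) ≤ pvClamp d (lo + m + 1) :=
        pvClamp_mono (by omega)
      have hstep : pvClamp d (lo + m + 1) ≤ pvClamp d (lo + m) + 1 :=
        pvClamp_step d (lo + m)
      have hlo : pvClamp d lo ≤ pvClamp d (lo + m) := pvClamp_mono (by omega)
      by_cases hc : pvClamp d (lo + m + 1) = pvClamp d (lo + m)
      · rw [if_pos (by rw [PySem.List.mem_pyRange_one]; omega), hc]
      · rw [if_neg (by rw [PySem.List.mem_pyRange_one]; omega)]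
        rw [show pvClamp d (lo + (m : Int) + 1) = pvClamp d (lo + m) + 1 by omega,
            ← PySem.List.pyRange_one_succ_right (show pvClamp d lo ≤ pvClamp d (lo + m) + 1 by omega)]

-- ===== VERDICT (by name: the statement is the Claim_ definition above) =====
theorem get_slice_indices_around_spec : Claim_equal_get_slice_indices_around := by
  intro c d k _
  unfold Spec_get_slice_indices_around get_slice_indices_around get_slice_indices_around_alt
  by_cases hk : k ≤ 1
  · simp [hk]
  · simp only [if_neg hk]
    set k' := if PySem.Int.mod k 2 == 0 then k + 1 else k with hk'
    have hk2 : 2 ≤ k' := by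
      rw [hk']; split <;> omega
    set half := PySem.Int.floordiv k' 2 with hhalf
    have hh : 1 ≤ half := by
      rw [hhalf, PySem.Int.floordiv_eq_ediv_of_pos (by omega)]; omega
    rw [pvRange_map_add, show (fun i => max 0 (min (d - 1) i)) = pvClamp d from rfl]
    have hn : c + (half + 1) = (c + -half) + ((2 * half).toNat : Int) + 1 := by omega
    rw [hn, pvDedup_clamped_range d (c + -half) (2 * half).toNat]
    have h1 : pvClamp d (c + -half) = max 0 (min (d - 1) (c - half)) := by
      unfold pvClamp; omega
    have h2 : pvClamp d (c + -half + ((2 * half).toNat : Int)) = max 0 (min (d - 1) (c + half)) := by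
      unfold pvClamp; omega
    rw [h1, h2]
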